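-- pv_equiv track=rewrite | github.com/captainjack331089/captainjack33.LeetCode | Data_Structure_and_Algorithm_In_Python/Chapter1/C-1.14.py | isOddsum
-- ===== SOURCE A (Python) =====
-- def isOddsum(nums):
--     pair = []
--     for i in nums:
--         if i not in pair and i % 2 == 1:
--             pair.append(i)
--
--     if len(pair) >= 2:
--             return True
--     return False
-- ===== SOURCE B (Python) =====
-- def isOddsum(nums):
--     first = None
--     for i in nums:
--         if i % 2 == 1:
--             if first is None:
--                 first = i
--             elif i != first:
--                 return True
--     return False
-- ===== Notes on version B (the rewrite author's own statement) =====
-- stated objective: simpler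
-- what changed: Replaces building a list of distinct odd values followed by a length test with a single pass that remembers one odd value and returns True as soon as a second distinct odd appears, eliminating the membership scan and the collection entirely.
import Mathlib
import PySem

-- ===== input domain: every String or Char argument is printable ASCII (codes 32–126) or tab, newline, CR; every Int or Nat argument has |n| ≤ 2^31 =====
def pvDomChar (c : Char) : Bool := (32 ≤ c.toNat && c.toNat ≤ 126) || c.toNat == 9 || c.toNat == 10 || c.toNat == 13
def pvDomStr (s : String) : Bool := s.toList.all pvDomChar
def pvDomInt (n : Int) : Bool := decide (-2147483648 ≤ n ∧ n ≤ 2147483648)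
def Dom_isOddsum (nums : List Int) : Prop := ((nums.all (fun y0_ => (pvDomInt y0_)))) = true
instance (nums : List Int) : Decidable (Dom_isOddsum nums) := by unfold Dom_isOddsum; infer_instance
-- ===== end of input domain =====

-- B replaces A's distinct-odd list + length test by one pass remembering a single odd value (simpler, early exit).

-- ===== PORT A =====
-- A's loop: build the list `pair` of distinct odd values, then test its length.
def isOddsumLoopA : List Int → List Int → List Int
  | [], pair => pair
  | i :: t, pair =>
      isOddsumLoopA t (if ¬ (i ∈ pair) ∧ PySem.Int.mod i 2 = 1 then pair ++ [i] else pair)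

def isOddsum (nums : List Int) : Bool :=
  decide (2 ≤ (isOddsumLoopA nums []).length)

-- ===== PORT B =====
-- B's loop: `first` holds the first odd value seen (none before any odd).
def isOddsumLoopB : List Int → Option Int → Bool
  | [], _ => false
  | i :: t, first =>
      if PySem.Int.mod i 2 = 1 then
        match first with
        | none => isOddsumLoopB t (some i)
        | some f => if i ≠ f then true else isOddsumLoopB t (some f)
      else isOddsumLoopB t first

def isOddsum_alt (nums : List Int) : Bool := isOddsumLoopB nums none

-- ===== PRECONDITION & SPEC =====
def Spec_isOddsum (nums : List Int) (out : Bool) : Prop := out = isOddsum_alt nums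
instance (nums : List Int) (out : Bool) : Decidable (Spec_isOddsum nums out) := by unfold Spec_isOddsum; infer_instance

-- ===== CLAIM (what is proved, stated in full; the proofs are below) =====
def Claim_equal_isOddsum : Prop := ∀ (nums : List Int), Dom_isOddsum nums → Spec_isOddsum nums (isOddsum nums)

-- ===== LEMMAS AND PROOFS =====

theorem loopA_length_mono (t : List Int) (p : List Int) :
    p.length ≤ (isOddsumLoopA t p).length := by
  induction t generalizing p with
  | nil => simp [isOddsumLoopA]
  | cons i t ih =>
      simp only [isOddsumLoopA]
      split
      · exact le_trans (by simp) (ih _)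
      · exact ih p

theorem loopB_some (t : List Int) (f : Int) :
    isOddsumLoopB t (some f) = decide (2 ≤ (isOddsumLoopA t [f]).length) := by
  induction t generalizing f with
  | nil => simp [isOddsumLoopB, isOddsumLoopA]
  | cons i t ih =>
      simp only [isOddsumLoopB, isOddsumLoopA,
        PySem.Int.mod_eq_emod_of_pos (b := 2) (by norm_num)]
      by_cases hodd : i % 2 = 1
      · by_cases hif : i = f
        · subst hif
          simp [hodd, ih]
        · simp only [hodd, if_true, hif, not_false_iff, and_true, List.mem_singleton,
            if_pos (show ¬ i = f ∧ True from ⟨hif, trivial⟩)]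
          have hmono := loopA_length_mono t [f, i]
          simp only [List.length_cons, List.length_nil] at hmono
          simp [hif, hodd]
          omega
      · simp [hodd, ih]

theorem loopB_none (t : List Int) :
    isOddsumLoopB t none = decide (2 ≤ (isOddsumLoopA t []).length) := by
  induction t with
  | nil => simp [isOddsumLoopB, isOddsumLoopA]
  | cons i t ih =>
      simp only [isOddsumLoopB, isOddsumLoopA,
        PySem.Int.mod_eq_emod_of_pos (b := 2) (by norm_num)]
      by_cases hodd : i % 2 = 1
      · simp [hodd, loopB_some]
      · simp [hodd, ih]

-- ===== VERDICT (by name: the statement is the Claim_ definition above) =====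
theorem isOddsum_spec : Claim_equal_isOddsum := by
  intro nums _
  unfold Spec_isOddsum isOddsum isOddsum_alt
  rw [loopB_none]
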